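-- pv_equiv track=rewrite | github.com/DaniElectra/libcipher | libcipher/binary.py | decrypt_binary
-- ===== SOURCE A (Python) =====
-- UppercaseList = [ 'A', 'B', 'C',
--                   'D', 'E', 'F',
--                   'G', 'H', 'I',
--                   'J', 'K', 'L',
--                   'M', 'N', 'O',
--                   'P', 'Q', 'R',
--                   'S', 'T', 'U',
--                   'V', 'W', 'X',
--                   'Y', 'Z' ]
--
-- LowercaseList = [ 'a', 'b', 'c',
--                   'd', 'e', 'f',
--                   'g', 'h', 'i',
--                   'j', 'k', 'l',
--                   'm', 'n', 'o',
--                   'p', 'q', 'r',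
--                   's', 't', 'u',
--                   'v', 'w', 'x',
--                   'y', 'z' ]
--
-- def decrypt_binary(string: str, offset: int) -> str:
--     '''Decrypt a given binary text to a string'''
--     # Add an ending space to detect the last character
--     string += ' '
--
--     decipher = ''
--     ciphered_text = ''
--     for letter in string:
--         # Check if character is a space
--         if letter == ' ':
--             # Ignore if there is an extra space
--             if ciphered_text == '':
--                 continue
--
--             # Reconvert to Python binary
--             while ciphered_text[0] == '0':
--                 ciphered_text = ciphered_text[1:]
--
--             # Decode binary character
--             character_int = int(ciphered_text, 2)
--             character = chr(character_int)
--
--             # Search if letter exists in lists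
--             if character in UppercaseList:
--                 letter_number = UppercaseList.index(character) - offset
--
--                 # Check if letter offset bypasses list limit
--                 if letter_number < 0:
--                     letter_number += len(UppercaseList)
--
--                 decipher += UppercaseList[letter_number]
--                 ciphered_text = ''
--                 continue
--
--             if character in LowercaseList:
--                 letter_number = LowercaseList.index(character) - offset
--
--                 # Check if letter offset bypasses list limit
--                 if letter_number < 0:
--                     letter_number += len(LowercaseList)
--
--                 decipher += LowercaseList[letter_number]
--                 ciphered_text = ''
--                 continue
--
--             # Apply shift to numbers (DISABLED BY DEFAULT)
--             """ if character.isnumeric():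
--                 new_number = int(character) - offset
--
--                 # Make number only one digit
--                 if new_number < 0:
--                     new_number += 10
--
--                 decipher += str(new_number)
--                 ciphered_text = ''
--                 continue """
--             decipher += character
--             ciphered_text = ''
--         else:
--             # Store binary string of single character
--             ciphered_text += letter
--
--     return decipher
-- ===== SOURCE B (Python) =====
-- def decrypt_binary(string: str, offset: int) -> str:
--     '''Decrypt a given binary text to a string'''
--     out = []
--     for token in string.split(' '):
--         if token:
--             character = chr(int(token.lstrip('0'), 2))
--             if 'A' <= character <= 'Z':
--                 character = chr(ord('A') + (ord(character) - ord('A') - offset) % 26)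
--             elif 'a' <= character <= 'z':
--                 character = chr(ord('a') + (ord(character) - ord('a') - offset) % 26)
--             out.append(character)
--     return ''.join(out)
-- ===== Notes on version B (the rewrite author's own statement) =====
-- stated objective: simpler
-- what changed: B splits the string into tokens up front instead of A's character-by-character accumulator loop with a sentinel space, and replaces A's 26-entry alphabet lists with their linear membership test, .index scan, conditional +26 fixup and negative-list-index wraparound by direct ord/chr arithmetic with a single mod 26.
-- crash fix: On letter tokens whose decoded alphabet index minus offset falls outside the one-+26-fixup window A raises IndexError on the alphabet-list lookup, while B's mod-26 arithmetic returns the properly wrapped Caesar letter (e.g. ('1100001', 60) -> 's'). — e.g. on decrypt_binary("1100001", 60): A raises IndexError, B returns "s"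
import Mathlib
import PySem

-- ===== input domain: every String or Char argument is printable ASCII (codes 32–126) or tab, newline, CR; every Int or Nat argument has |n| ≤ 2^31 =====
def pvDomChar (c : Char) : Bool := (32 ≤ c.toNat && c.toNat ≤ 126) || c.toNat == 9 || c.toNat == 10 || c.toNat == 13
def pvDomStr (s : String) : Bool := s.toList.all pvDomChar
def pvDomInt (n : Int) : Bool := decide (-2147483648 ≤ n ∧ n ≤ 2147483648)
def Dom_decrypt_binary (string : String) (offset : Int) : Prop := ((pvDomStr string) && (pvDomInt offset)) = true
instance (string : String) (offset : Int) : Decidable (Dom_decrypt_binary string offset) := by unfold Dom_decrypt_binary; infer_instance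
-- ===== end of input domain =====

-- B replaces A's character-accumulator loop (sentinel space appended) by an up-front split into
-- tokens, and A's alphabet lists / .index scan / conditional +26 by direct ord-arithmetic mod 26;
-- equal return values on Pre_ (which excludes exactly A's exception paths plus surrogate code points).

-- chr(n): hand-ported (PySem has no chr). none exactly where Python's chr raises (n < 0 or
-- n ≥ 0x110000) and ALSO on UTF-16 surrogates 0xD800–0xDFFF, which Python's chr returns but a
-- Lean Char cannot represent; Pre_ excludes the surrogate tokens. Shared: both Pythons call chr.
def pyChr? (n : Int) : Option Char :=
  if 0 ≤ n ∧ n < 1114112 ∧ ¬(55296 ≤ n ∧ n ≤ 57343) then some (Char.ofNat n.toNat) else none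

-- ===== PORT A =====
def UppercaseList : List Char :=
  ['A','B','C','D','E','F','G','H','I','J','K','L','M','N','O','P','Q','R','S','T','U','V','W','X','Y','Z']
def LowercaseList : List Char :=
  ['a','b','c','d','e','f','g','h','i','j','k','l','m','n','o','p','q','r','s','t','u','v','w','x','y','z']

-- "while ciphered_text[0] == '0': ciphered_text = ciphered_text[1:]"; none = IndexError on ''[0]
def stripZerosA : List Char → Option (List Char)
  | [] => none
  | c :: cs => if c = '0' then stripZerosA cs else some (c :: cs)

-- body of A's "letter == ' '" branch for a nonempty ciphered_text; none = a raise in A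
def procA (offset : Int) (ct : List Char) : Option Char :=
  match stripZerosA ct with
  | none => none
  | some t =>
    match PySem.Int.ofCharsBase? t 2 with   -- int(ciphered_text, 2); none = ValueError
    | none => none
    | some v =>
      match pyChr? v with
      | none => none
      | some character =>
        if UppercaseList.contains character then
          match PySem.List.index? UppercaseList character with
          | none => none
          | some i =>
            let letterNumber : Int := (i : Int) - offset
            let letterNumber := if letterNumber < 0 then letterNumber + 26 else letterNumber
            PySem.List.pyGet? UppercaseList letterNumber
        else if LowercaseList.contains character then
          match PySem.List.index? LowercaseList character with
          | none => none
          | some i =>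
            let letterNumber : Int := (i : Int) - offset
            let letterNumber := if letterNumber < 0 then letterNumber + 26 else letterNumber
            PySem.List.pyGet? LowercaseList letterNumber
        else some character

def loopA (offset : Int) : List Char → List Char → List Char → Option (List Char)
  | [], dec, _ct => some dec
  | c :: rest, dec, ct =>
    if c = ' ' then
      if ct = [] then loopA offset rest dec []
      else
        match procA offset ct with
        | some ch => loopA offset rest (dec ++ [ch]) []
        | none => none
    else loopA offset rest dec (ct ++ [c])

def decrypt_binary (string : String) (offset : Int) : String :=
  match loopA offset (string.toList ++ [' ']) [] [] with   -- string += ' '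
  | some dec => String.mk dec
  | none => ""   -- exception path; excluded by Pre_

-- ===== PORT B =====
-- per-token body of B's loop; none = a raise in B
def procB (offset : Int) (tok : List Char) : Option Char :=
  match PySem.Int.ofCharsBase? (tok.dropWhile (· == '0')) 2 with  -- int(token.lstrip('0'), 2)
  | none => none
  | some v =>
    match pyChr? v with
    | none => none
    | some character =>
      if 'A' ≤ character ∧ character ≤ 'Z' then
        some (Char.ofNat (65 + PySem.Int.mod ((character.toNat : Int) - 65 - offset) 26).toNat)
      else if 'a' ≤ character ∧ character ≤ 'z' then
        some (Char.ofNat (97 + PySem.Int.mod ((character.toNat : Int) - 97 - offset) 26).toNat)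
      else some character

def loopB (offset : Int) : List (List Char) → List Char → Option (List Char)
  | [], out => some out
  | t :: ts, out =>
    if t = [] then loopB offset ts out
    else
      match procB offset t with
      | some ch => loopB offset ts (out ++ [ch])
      | none => none

def decrypt_binary_alt (string : String) (offset : Int) : String :=
  match loopB offset (PySem.Chars.splitOn string.toList [' ']) [] with
  | some out => String.mk out
  | none => ""

-- ===== PRECONDITION & SPEC =====
-- tokOKb offset t: on token t, A (and B) completes without an exception AND the decoded code
-- point is not a UTF-16 surrogate (Python returns a lone-surrogate str there, which a Lean
-- String cannot hold — the only inputs Pre_ excludes on which A returns).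
-- The offset window for letters is exactly where A's list indexing (after its one +26 fixup,
-- including Python's negative-index wraparound) stays in range.
def tokOKb (offset : Int) (t : List Char) : Bool :=
  match PySem.Int.ofCharsBase? (t.dropWhile (· == '0')) 2 with
  | none => false
  | some v =>
    decide (0 ≤ v) && decide (v < 1114112) && !(decide (55296 ≤ v) && decide (v ≤ 57343)) &&
    (!(decide (65 ≤ v) && decide (v ≤ 90)) || (decide (v - 90 ≤ offset) && decide (offset ≤ v - 13))) &&
    (!(decide (97 ≤ v) && decide (v ≤ 122)) || (decide (v - 122 ≤ offset) && decide (offset ≤ v - 45)))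

-- Pre_ admits exactly the inputs on which A returns, minus tokens decoding to surrogates (see pyChr?);
-- e.g. ("1000001 1000010", 1), ("1100001 1111011 110100", 3), ("1000001 1100010", -4),
-- ("10 11 101", 7) are admitted, while ("1100001", 60) is excluded (A raises IndexError there).
def Pre_decrypt_binary (string : String) (offset : Int) : Prop :=
  ∀ t ∈ PySem.Chars.splitOn string.toList [' '], t ≠ [] → tokOKb offset t = true
instance (string : String) (offset : Int) : Decidable (Pre_decrypt_binary string offset) := by
  unfold Pre_decrypt_binary; infer_instance

def pvWitness_decrypt_binary : String × Int := ("1000001 1000010", 1)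

-- tokRetB t: B completes on token t (it parses as binary and decodes to a representable,
-- non-surrogate code point); letterBadA offset t: t decodes to a letter whose index minus
-- offset falls outside the window A's single +26 fixup can bring back into list range.
def tokRetB (t : List Char) : Bool :=
  match PySem.Int.ofCharsBase? (t.dropWhile (· == '0')) 2 with
  | none => false
  | some v =>
    decide (0 ≤ v) && decide (v < 1114112) && !(decide (55296 ≤ v) && decide (v ≤ 57343))

def letterBadA (offset : Int) (t : List Char) : Bool :=
  match PySem.Int.ofCharsBase? (t.dropWhile (· == '0')) 2 with
  | none => false
  | some v =>
    (decide (65 ≤ v) && decide (v ≤ 90) && !(decide (v - 90 ≤ offset) && decide (offset ≤ v - 13))) ||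
    (decide (97 ≤ v) && decide (v ≤ 122) && !(decide (v - 122 ≤ offset) && decide (offset ≤ v - 45)))

-- On letter tokens whose alphabet index minus offset falls outside the one-+26-fixup window,
-- A raises IndexError on its alphabet-list lookup while B's mod-26 arithmetic returns the
-- properly wrapped Caesar letter.
def Raises_decrypt_binary (string : String) (offset : Int) : Prop :=
  (∀ t ∈ PySem.Chars.splitOn string.toList [' '], t ≠ [] → tokRetB t = true) ∧
  (∃ t ∈ PySem.Chars.splitOn string.toList [' '], t ≠ [] ∧ letterBadA offset t = true)
instance (string : String) (offset : Int) : Decidable (Raises_decrypt_binary string offset) := by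
  unfold Raises_decrypt_binary; infer_instance

def pvRaiseWitness_decrypt_binary : String × Int := ("1100001", 60)
def pvRaiseWitnessOut_decrypt_binary : String := "s"

def Spec_decrypt_binary (string : String) (offset : Int) (out : String) : Prop := out = decrypt_binary_alt string offset
instance (string : String) (offset : Int) (out : String) : Decidable (Spec_decrypt_binary string offset out) := by unfold Spec_decrypt_binary; infer_instance

-- ===== CLAIM (what is proved, stated in full; the proofs are below) =====
def Claim_equal_decrypt_binary : Prop := ∀ (string : String) (offset : Int), Dom_decrypt_binary string offset → Pre_decrypt_binary string offset → Spec_decrypt_binary string offset (decrypt_binary string offset)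

def Claim_raises_decrypt_binary : Prop := (∀ (string : String) (offset : Int), Dom_decrypt_binary string offset → Raises_decrypt_binary string offset → ¬ Pre_decrypt_binary string offset) ∧ (Dom_decrypt_binary (pvRaiseWitness_decrypt_binary.1) (pvRaiseWitness_decrypt_binary.2) ∧ Raises_decrypt_binary (pvRaiseWitness_decrypt_binary.1) (pvRaiseWitness_decrypt_binary.2) ∧ decrypt_binary_alt (pvRaiseWitness_decrypt_binary.1) (pvRaiseWitness_decrypt_binary.2) = pvRaiseWitnessOut_decrypt_binary)

-- ===== LEMMAS AND PROOFS =====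

theorem pvWitness_ok :
    Dom_decrypt_binary pvWitness_decrypt_binary.1 pvWitness_decrypt_binary.2 ∧
    Pre_decrypt_binary pvWitness_decrypt_binary.1 pvWitness_decrypt_binary.2 := by decide

-- simple split function: s.split(' ') , and its agreement with PySem.Chars.splitOn · [' ']
def sp : List Char → List (List Char)
  | [] => [[]]
  | c :: rest =>
    if c = ' ' then [] :: sp rest
    else
      match sp rest with
      | [] => [[c]]
      | t :: ts => (c :: t) :: ts

theorem sp_ne_nil (cs : List Char) : sp cs ≠ [] := by
  cases cs with
  | nil => simp [sp]
  | cons c rest =>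
    simp only [sp]
    split <;> [simp; skip]
    split <;> simp

theorem splitOn_go_eq_sp (fuel : Nat) (l cur : List Char) (acc : List (List Char))
    (h : l.length ≤ fuel) :
    PySem.Chars.splitOn.go [' '] fuel l cur acc =
      acc.reverse ++ (match sp l with
                      | [] => [cur.reverse]
                      | t :: ts => (cur.reverse ++ t) :: ts) := by
  induction fuel generalizing l cur acc with
  | zero =>
    interval_cases hl : l.length
    · rw [List.length_eq_zero_iff] at hl
      subst hl
      simp [PySem.Chars.splitOn.go, sp]
  | succ fuel ih =>
    cases l with
    | nil => simp [PySem.Chars.splitOn.go, sp]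
    | cons c rest =>
      simp only [PySem.Chars.splitOn.go]
      by_cases hc : c = ' '
      · subst hc
        have hpre : [' '].isPrefixOf (' ' :: rest) = true := by simp [List.isPrefixOf]
        rw [if_pos hpre]
        rw [ih _ _ _ (by simpa using Nat.le_of_succ_le_succ (by simpa using h))]
        simp only [sp]
        cases hsp : sp rest with
        | nil => exact absurd hsp (sp_ne_nil rest)
        | cons t ts => simp [hsp]
      · have hpre : [' '].isPrefixOf (c :: rest) = false := by
          simp [List.isPrefixOf]; intro hc'; exact absurd hc'.symm hc
        rw [if_neg (by simp [hpre])]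
        rw [ih _ _ _ (by simpa using Nat.le_of_succ_le_succ (by simpa using h))]
        simp only [sp, if_neg hc]
        cases hsp : sp rest with
        | nil => exact absurd hsp (sp_ne_nil rest)
        | cons t ts => simp

theorem splitOn_eq_sp (s : List Char) : PySem.Chars.splitOn s [' '] = sp s := by
  unfold PySem.Chars.splitOn
  rw [splitOn_go_eq_sp (s.length + 1) s [] [] (by omega)]
  cases hsp : sp s with
  | nil => exact absurd hsp (sp_ne_nil s)
  | cons t ts => simp

theorem sp_no_space (cs : List Char) (h : ' ' ∉ cs) : sp cs = [cs] := by
  induction cs with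
  | nil => rfl
  | cons c rest ih =>
    simp only [List.mem_cons, not_or] at h
    simp only [sp, if_neg (Ne.symm h.1), ih h.2]

theorem sp_append_space (ct cs : List Char) (h : ' ' ∉ ct) :
    sp (ct ++ ' ' :: cs) = ct :: sp cs := by
  induction ct with
  | nil => simp [sp]
  | cons c rest ih =>
    simp only [List.mem_cons, not_or] at h
    simp only [List.cons_append, sp, if_neg (Ne.symm h.1), ih h.2]

-- characterizations of the alphabet lists
theorem contains_upper (c : Char) :
    UppercaseList.contains c = true ↔ 65 ≤ c.toNat ∧ c.toNat ≤ 90 := by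
  constructor
  · intro h
    simp only [UppercaseList, List.contains_eq_mem, List.mem_cons, decide_eq_true_eq,
      List.not_mem_nil, or_false] at h
    rcases h with h|h|h|h|h|h|h|h|h|h|h|h|h|h|h|h|h|h|h|h|h|h|h|h|h|h <;> subst h <;> decide
  · rintro ⟨h1, h2⟩
    have hc : c = Char.ofNat c.toNat := (Char.ofNat_toNat c).symm
    interval_cases h : c.toNat <;> rw [hc] <;> decide

theorem contains_lower (c : Char) :
    LowercaseList.contains c = true ↔ 97 ≤ c.toNat ∧ c.toNat ≤ 122 := by
  constructor
  · intro h
    simp only [LowercaseList, List.contains_eq_mem, List.mem_cons, decide_eq_true_eq,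
      List.not_mem_nil, or_false] at h
    rcases h with h|h|h|h|h|h|h|h|h|h|h|h|h|h|h|h|h|h|h|h|h|h|h|h|h|h <;> subst h <;> decide
  · rintro ⟨h1, h2⟩
    have hc : c = Char.ofNat c.toNat := (Char.ofNat_toNat c).symm
    interval_cases h : c.toNat <;> rw [hc] <;> decide

theorem index?_upper (c : Char) (h1 : 65 ≤ c.toNat) (h2 : c.toNat ≤ 90) :
    PySem.List.index? UppercaseList c = some (c.toNat - 65) := by
  have hc : c = Char.ofNat c.toNat := (Char.ofNat_toNat c).symm
  interval_cases h : c.toNat <;> rw [hc] <;> decide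

theorem index?_lower (c : Char) (h1 : 97 ≤ c.toNat) (h2 : c.toNat ≤ 122) :
    PySem.List.index? LowercaseList c = some (c.toNat - 97) := by
  have hc : c = Char.ofNat c.toNat := (Char.ofNat_toNat c).symm
  interval_cases h : c.toNat <;> rw [hc] <;> decide

-- A's shifted list lookup (one +26 fixup, then Python indexing with possible negative wrap)
-- equals the mod-26 arithmetic of B, on the window where A's lookup is in range.
theorem shift_upper (k : Int) (h1 : -52 ≤ k) (h2 : k ≤ 25) :
    PySem.List.pyGet? UppercaseList (if k < 0 then k + 26 else k) =
      some (Char.ofNat (65 + PySem.Int.mod k 26).toNat) := by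
  interval_cases k <;> decide

theorem shift_lower (k : Int) (h1 : -52 ≤ k) (h2 : k ≤ 25) :
    PySem.List.pyGet? LowercaseList (if k < 0 then k + 26 else k) =
      some (Char.ofNat (97 + PySem.Int.mod k 26).toNat) := by
  interval_cases k <;> decide

theorem stripZerosA_eq_dropWhile (t : List Char) (h : t.dropWhile (· == '0') ≠ []) :
    stripZerosA t = some (t.dropWhile (· == '0')) := by
  induction t with
  | nil => simp [List.dropWhile] at h
  | cons c cs ih =>
    by_cases hc : c = '0'
    · subst hc
      rw [List.dropWhile_cons_of_pos (by decide)] at h ⊢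
      exact (by simpa [stripZerosA] using ih h)
    · rw [List.dropWhile_cons_of_neg (by simpa using hc)] at h ⊢
      simp [stripZerosA, hc]

theorem char_le_iff (c d : Char) : (c ≤ d) ↔ c.toNat ≤ d.toNat := by
  rw [Char.le_def, UInt32.le_iff_toNat_le]; rfl

-- the per-token agreement: wherever tokOKb holds, A's branch body and B's branch body
-- both return, and return the same character
theorem proc_eq (offset : Int) (t : List Char) (h : tokOKb offset t = true) :
    ∃ c, procA offset t = some c ∧ procB offset t = some c := by
  unfold tokOKb at h
  cases hv : PySem.Int.ofCharsBase? (t.dropWhile (· == '0')) 2 with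
  | none => rw [hv] at h; exact absurd h (by simp)
  | some v =>
    rw [hv] at h
    simp only [Bool.and_eq_true, Bool.or_eq_true, Bool.not_eq_true', Bool.and_eq_false_iff,
      decide_eq_true_eq, decide_eq_false_iff_not, not_le] at h
    obtain ⟨⟨⟨⟨hv0, hvlt⟩, hsur⟩, hup⟩, hlo⟩ := h
    have hne : t.dropWhile (· == '0') ≠ [] := by
      intro hnil
      have h0 : PySem.Int.ofCharsBase? ([] : List Char) 2 = none := by decide
      rw [hnil, h0] at hv
      exact absurd hv (by simp)
    have hchr : pyChr? v = some (Char.ofNat v.toNat) := by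
      unfold pyChr?
      rw [if_pos]
      refine ⟨hv0, hvlt, ?_⟩
      rintro ⟨ha, hb⟩
      rcases hsur with h|h
      · omega
      · omega
    have htoNat : (Char.ofNat v.toNat).toNat = v.toNat := by
      rw [Char.toNat_ofNat, if_pos]
      have : v.toNat < 1114112 := by omega
      have hns : ¬(55296 ≤ v.toNat ∧ v.toNat ≤ 57343) := by
        rintro ⟨ha, hb⟩
        rcases hsur with h|h <;> omega
      unfold Nat.isValidChar
      omega
    unfold procA procB
    rw [stripZerosA_eq_dropWhile t hne]
    simp only [hv, hchr]
    set ch := Char.ofNat v.toNat with hch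
    by_cases hU : 65 ≤ v ∧ v ≤ 90
    · have hb1 : 65 ≤ ch.toNat ∧ ch.toNat ≤ 90 := by rw [htoNat]; omega
      rw [if_pos ((contains_upper ch).mpr hb1),
          index?_upper ch hb1.1 hb1.2]
      have hoff : v - 90 ≤ offset ∧ offset ≤ v - 13 := by
        rcases hup with h|h
        · omega
        · exact h
      have hcast : ((ch.toNat - 65 : Nat) : Int) = v - 65 := by
        rw [htoNat]; omega
      have hiff : ('A' ≤ ch ∧ ch ≤ 'Z') := by
        constructor <;> rw [char_le_iff] <;> simp [htoNat] <;> omega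
      rw [if_pos hiff]
      simp only [hcast]
      have hk1 : -52 ≤ v - 65 - offset := by omega
      have hk2 : v - 65 - offset ≤ 25 := by omega
      have := shift_upper (v - 65 - offset) hk1 hk2
      refine ⟨_, by rw [← this], ?_⟩
      have : ((ch.toNat : Int) - 65 - offset) = v - 65 - offset := by rw [htoNat]; omega
      rw [this]
    · by_cases hL : 97 ≤ v ∧ v ≤ 122
      · have hb1 : 97 ≤ ch.toNat ∧ ch.toNat ≤ 122 := by rw [htoNat]; omega
        have hnotU : UppercaseList.contains ch = false := by
          rw [Bool.eq_false_iff]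
          intro hcon
          have := (contains_upper ch).mp hcon
          rw [htoNat] at this; omega
        rw [hnotU]
        simp only [Bool.false_eq_true, if_false]
        rw [if_pos ((contains_lower ch).mpr hb1),
            index?_lower ch hb1.1 hb1.2]
        have hoff : v - 122 ≤ offset ∧ offset ≤ v - 45 := by
          rcases hlo with h|h
          · omega
          · exact h
        have hcast : ((ch.toNat - 97 : Nat) : Int) = v - 97 := by
          rw [htoNat]; omega
        have hnotiffU : ¬('A' ≤ ch ∧ ch ≤ 'Z') := by
          rintro ⟨ha, hb⟩
          rw [char_le_iff] at ha hb
          simp [htoNat] at ha hb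
          omega
        have hiff : ('a' ≤ ch ∧ ch ≤ 'z') := by
          constructor <;> rw [char_le_iff] <;> simp [htoNat] <;> omega
        rw [if_neg hnotiffU, if_pos hiff]
        simp only [hcast]
        have hk1 : -52 ≤ v - 97 - offset := by omega
        have hk2 : v - 97 - offset ≤ 25 := by omega
        have := shift_lower (v - 97 - offset) hk1 hk2
        refine ⟨_, by rw [← this], ?_⟩
        have : ((ch.toNat : Int) - 97 - offset) = v - 97 - offset := by rw [htoNat]; omega
        rw [this]
      · have hnotU : UppercaseList.contains ch = false := by
          rw [Bool.eq_false_iff]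
          intro hcon
          have := (contains_upper ch).mp hcon
          rw [htoNat] at this; omega
        have hnotL : LowercaseList.contains ch = false := by
          rw [Bool.eq_false_iff]
          intro hcon
          have := (contains_lower ch).mp hcon
          rw [htoNat] at this; omega
        rw [hnotU, hnotL]
        have hnotiffU : ¬('A' ≤ ch ∧ ch ≤ 'Z') := by
          rintro ⟨ha, hb⟩
          rw [char_le_iff] at ha hb
          simp [htoNat] at ha hb
          omega
        have hnotiffL : ¬('a' ≤ ch ∧ ch ≤ 'z') := by
          rintro ⟨ha, hb⟩
          rw [char_le_iff] at ha hb
          simp [htoNat] at ha hb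
          omega
        simp only [Bool.false_eq_true, if_false]
        rw [if_neg hnotiffU, if_neg hnotiffL]
        exact ⟨ch, rfl, rfl⟩

-- the loop correspondence: A's char loop over cs ++ [' '] with pending token ct equals
-- B's loop over the tokens of ct ++ cs
theorem loop_eq (offset : Int) (cs ct dec : List Char) (hct : ' ' ∉ ct)
    (h : ∀ t ∈ sp (ct ++ cs), t ≠ [] → tokOKb offset t = true) :
    loopA offset (cs ++ [' ']) dec ct = loopB offset (sp (ct ++ cs)) dec := by
  induction cs generalizing ct dec with
  | nil =>
    rw [List.append_nil] at h ⊢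
    rw [sp_no_space ct hct] at h ⊢
    by_cases hc : ct = []
    · subst hc
      simp [loopA, loopB]
    · have hok := h ct (by simp) hc
      obtain ⟨c, hA, hB⟩ := proc_eq offset ct hok
      simp only [List.nil_append, loopA, hA, loopB, if_neg hc, hB]
      rfl
  | cons c rest ih =>
    by_cases hc : c = ' '
    · subst hc
      rw [sp_append_space ct rest hct] at h ⊢
      by_cases hct0 : ct = []
      · subst hct0
        simp only [loopA, List.cons_append]
        rw [ih [] dec (by simp) (fun t ht => h t (List.mem_cons_of_mem _ (by simpa using ht)))]
        simp [loopB]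
      · have hok := h ct (by simp) hct0
        obtain ⟨ch, hA, hB⟩ := proc_eq offset ct hok
        simp only [List.cons_append, loopA, if_neg hct0, hA]
        rw [ih [] (dec ++ [ch]) (by simp) (fun t ht => h t (List.mem_cons_of_mem _ (by simpa using ht)))]
        simp [loopB, hB, hct0]
    · simp only [List.cons_append, loopA, if_neg hc]
      have hassoc : ct ++ c :: rest = (ct ++ [c]) ++ rest := by simp
      rw [hassoc] at h
      rw [ih (ct ++ [c]) dec (by simp [hct, Ne.symm hc]) h, hassoc]

-- ===== VERDICT (by name: the statement is the Claim_ definition above) =====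
theorem decrypt_binary_spec : Claim_equal_decrypt_binary := by
  intro string offset _hdom hpre
  unfold Spec_decrypt_binary decrypt_binary decrypt_binary_alt
  unfold Pre_decrypt_binary at hpre
  rw [splitOn_eq_sp] at hpre ⊢
  rw [loop_eq offset string.toList [] [] (by simp) (by simpa using hpre)]
  simp

theorem decrypt_binary_raises : Claim_raises_decrypt_binary := by
  unfold Claim_raises_decrypt_binary
  refine ⟨?_, by decide⟩
  intro string offset _hdom hr hpre
  obtain ⟨_hall, t, ht, htne, hbad⟩ := hr
  have hok := hpre t ht htne
  unfold tokOKb at hok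
  unfold letterBadA at hbad
  cases hv : PySem.Int.ofCharsBase? (t.dropWhile (· == '0')) 2 with
  | none => rw [hv] at hbad; exact absurd hbad (by simp)
  | some v =>
    rw [hv] at hok hbad
    simp only [Bool.and_eq_true, Bool.or_eq_true, Bool.not_eq_true', Bool.and_eq_false_iff,
      decide_eq_true_eq, decide_eq_false_iff_not, not_le] at hok hbad
    rcases hbad with ⟨⟨h1, h2⟩, h3⟩ | ⟨⟨h1, h2⟩, h3⟩ <;>
      [rcases hok.1.2 with h|h; rcases hok.2 with h|h] <;> omega

-- self-check: the raise witness lies inside Raises_ and B's port returns "s" there (read off decrypt_binary_raises)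
theorem pvRaiseWitness_ok :
    Raises_decrypt_binary pvRaiseWitness_decrypt_binary.1 pvRaiseWitness_decrypt_binary.2 := by
  have h := decrypt_binary_raises
  unfold Claim_raises_decrypt_binary at h
  exact h.2.2.1
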